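-- pv_equiv track=rewrite | github.com/Potatopotage/TIL | Practice/Feb/종합문제/09.py | pairwise_tuples
-- ===== SOURCE A (Python) =====
-- def pairwise_tuples(lst):
--     str_lst = list(map(str, lst))
--
--     odd_list = []
--     even_list = []
--
--     if len(str_lst) % 2 == 0:
--         for i in range(len(str_lst)):
--             if (i + 1) % 2 == 1:
--                 odd_list.append(str_lst[i])
--             else:
--                 even_list.append(str_lst[i])
--         pair = list(zip(odd_list, even_list))
--
--         result_data = [(int(a), int(b)) for a, b in pair]
--
--
--         return result_data
--
--     else:
--         for i in range(len(str_lst)):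
--             if (i + 1) % 2 == 1:
--                 odd_list.append(str_lst[i])
--             else:
--                 even_list.append(str_lst[i])
--
--         even_list.append(None)
--
--         pair = list(zip(odd_list, even_list))
--         result_data = [(int(a), int(b)) if b is not None else (int(a), None) for a, b in pair]
--
--         return result_data
-- ===== SOURCE B (Python) =====
-- def pairwise_tuples(lst):
--     # Simpler: pair consecutive elements with one zip over a shared iterator;
--     # keep the int(str(x)) round-trip of the original.
--     it = iter(lst)
--     result = [(int(str(a)), int(str(b))) for a, b in zip(it, it)]
--     if len(lst) % 2 == 1:
--         result.append((int(str(lst[-1])), None))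
--     return result
-- ===== Notes on version B (the rewrite author's own statement) =====
-- stated objective: simpler
-- what changed: Replaces the parity-branched odd/even index split, None-padding and zip with a single pass that pairs consecutive elements directly (zip over one shared iterator) plus one append for an odd-length tail.
import Mathlib
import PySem

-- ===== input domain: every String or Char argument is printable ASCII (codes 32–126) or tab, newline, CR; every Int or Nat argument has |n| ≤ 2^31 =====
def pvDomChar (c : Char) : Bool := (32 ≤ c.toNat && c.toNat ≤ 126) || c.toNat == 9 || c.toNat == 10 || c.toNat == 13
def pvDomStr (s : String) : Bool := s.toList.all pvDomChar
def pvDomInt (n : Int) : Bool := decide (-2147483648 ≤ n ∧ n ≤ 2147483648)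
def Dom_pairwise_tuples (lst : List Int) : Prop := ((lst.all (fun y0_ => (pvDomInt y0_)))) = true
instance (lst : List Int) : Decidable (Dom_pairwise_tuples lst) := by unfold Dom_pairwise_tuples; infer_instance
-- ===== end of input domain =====

-- B pairs consecutive elements in one pass (zip over a shared iterator) instead of A's
-- parity-branched odd/even index split; return values are proved equal; objective: simpler.


-- ===== PORT A =====
-- int(a) / int(b) below act on outputs of str(·), where PySem.Int.ofStr? is always `some`,
-- so `.getD 0` is exact (the int() call never raises here).
def pairwise_tuples (lst : List Int) : List (Int × Option Int) :=
  let str_lst := lst.map PySem.Int.toStr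
  if PySem.Int.mod (PySem.List.len str_lst) 2 == 0 then
    let oe := (PySem.List.pyRange 0 (PySem.List.len str_lst) 1).foldl
      (fun (st : List String × List String) i =>
        if PySem.Int.mod (i + 1) 2 == 1 then (st.1 ++ [PySem.List.pyGetD str_lst i ""], st.2)
        else (st.1, st.2 ++ [PySem.List.pyGetD str_lst i ""])) ([], [])
    let pair := oe.1.zip oe.2
    pair.map (fun ab => ((PySem.Int.ofStr? ab.1).getD 0, some ((PySem.Int.ofStr? ab.2).getD 0)))
  else
    let oe := (PySem.List.pyRange 0 (PySem.List.len str_lst) 1).foldl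
      (fun (st : List String × List String) i =>
        if PySem.Int.mod (i + 1) 2 == 1 then (st.1 ++ [PySem.List.pyGetD str_lst i ""], st.2)
        else (st.1, st.2 ++ [PySem.List.pyGetD str_lst i ""])) ([], [])
    -- Python appends None to the string list even_list; Option String models that mixed list
    let even_list := oe.2.map some ++ [(none : Option String)]
    let pair := oe.1.zip even_list
    pair.map (fun ab => match ab.2 with
      | some b => ((PySem.Int.ofStr? ab.1).getD 0, some ((PySem.Int.ofStr? b).getD 0))
      | none => ((PySem.Int.ofStr? ab.1).getD 0, none))

-- ===== PORT B =====
-- list(zip(it, it)) on one shared iterator: consecutive disjoint pairs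
def pairsChunks : List Int → List (Int × Int)
  | a :: b :: rest => (a, b) :: pairsChunks rest
  | _ => []

-- lst[-1] is PySem.List.pyGet? lst (-1); it is reached only when len(lst) is odd, hence
-- lst ≠ [] and `.getD 0` is exact; int(str(·)) as in port A.
def pairwise_tuples_alt (lst : List Int) : List (Int × Option Int) :=
  let result := (pairsChunks lst).map (fun p =>
    ((PySem.Int.ofStr? (PySem.Int.toStr p.1)).getD 0,
     some ((PySem.Int.ofStr? (PySem.Int.toStr p.2)).getD 0)))
  if PySem.Int.mod (PySem.List.len lst) 2 == 1 then
    result ++ [((PySem.Int.ofStr? (PySem.Int.toStr ((PySem.List.pyGet? lst (-1)).getD 0))).getD 0, none)]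
  else result

-- ===== PRECONDITION & SPEC =====
def Spec_pairwise_tuples (lst : List Int) (out : List (Int × Option Int)) : Prop := out = pairwise_tuples_alt lst
instance (lst : List Int) (out : List (Int × Option Int)) : Decidable (Spec_pairwise_tuples lst out) := by unfold Spec_pairwise_tuples; infer_instance

-- ===== CLAIM (what is proved, stated in full; the proofs are below) =====
def Claim_equal_pairwise_tuples : Prop := ∀ (lst : List Int), Dom_pairwise_tuples lst → Spec_pairwise_tuples lst (pairwise_tuples lst)

-- ===== LEMMAS AND PROOFS =====

-- elements of s at even (resp. odd) positions
def oddsL {α : Type} : List α → List α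
  | [] => []
  | [a] => [a]
  | a :: _ :: r => a :: oddsL r

def evensL {α : Type} : List α → List α
  | [] => []
  | [_] => []
  | _ :: b :: r => b :: evensL r

-- A's loop body, on an (index, element) pair
def stepOE (st : List String × List String) (p : Int × String) : List String × List String :=
  if PySem.Int.mod (p.1 + 1) 2 == 1 then (st.1 ++ [p.2], st.2) else (st.1, st.2 ++ [p.2])

theorem fold_enum : ∀ (s : List String) (i : Int) (o e : List String), i % 2 = 0 →
    (PySem.List.enumerate s i).foldl stepOE (o, e) = (o ++ oddsL s, e ++ evensL s)
  | [], i, o, e, _ => by simp [PySem.List.enumerate_nil, oddsL, evensL]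
  | [a], i, o, e, hp => by
    (simp [PySem.List.enumerate_cons, PySem.List.enumerate_nil, stepOE, oddsL, evensL]; omega)
  | a :: b :: r, i, o, e, hp => by
    have ih := fold_enum r (i + 1 + 1) (o ++ [a]) (e ++ [b]) (by omega)
    simp only [PySem.List.enumerate_cons, List.foldl_cons]
    rw [show stepOE (o, e) (i, a) = (o ++ [a], e) from by (simp [stepOE]; omega)]
    rw [show stepOE (o ++ [a], e) (i + 1, b) = (o ++ [a], e ++ [b]) from by (simp [stepOE]; omega)]
    rw [ih]
    simp [oddsL, evensL]

-- the two int(str(·)) maps used below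
def fEv (ab : String × String) : Int × Option Int :=
  ((PySem.Int.ofStr? ab.1).getD 0, some ((PySem.Int.ofStr? ab.2).getD 0))
def fB (p : Int × Int) : Int × Option Int :=
  ((PySem.Int.ofStr? (PySem.Int.toStr p.1)).getD 0,
   some ((PySem.Int.ofStr? (PySem.Int.toStr p.2)).getD 0))

theorem even_case : ∀ (l : List Int), l.length % 2 = 0 →
    ((oddsL (l.map PySem.Int.toStr)).zip (evensL (l.map PySem.Int.toStr))).map fEv
      = (pairsChunks l).map fB
  | [], _ => by simp [oddsL, evensL, pairsChunks]
  | [a], h => by simp at h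
  | a :: b :: r, h => by
    have hr : r.length % 2 = 0 := by simp only [List.length_cons] at h; omega
    have ih := even_case r hr
    simp only [List.map_cons, oddsL, evensL, List.zip_cons_cons, pairsChunks]
    rw [ih]
    rfl

theorem odd_case : ∀ (l : List Int), l.length % 2 = 1 →
    ((oddsL (l.map PySem.Int.toStr)).zip ((evensL (l.map PySem.Int.toStr)).map some ++ [(none : Option String)])).map
        (fun ab => match ab.2 with
          | some b => ((PySem.Int.ofStr? ab.1).getD 0, some ((PySem.Int.ofStr? b).getD 0))
          | none => ((PySem.Int.ofStr? ab.1).getD 0, none))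
      = (pairsChunks l).map fB
        ++ [((PySem.Int.ofStr? (PySem.Int.toStr ((PySem.List.pyGet? l (-1)).getD 0))).getD 0, none)]
  | [], h => by simp at h
  | [a], _ => by
    simp [oddsL, evensL, pairsChunks, PySem.List.pyGet?_neg_one]
  | a :: b :: r, h => by
    have hr : r.length % 2 = 1 := by simp only [List.length_cons] at h; omega
    have hne : r ≠ [] := by intro hnil; rw [hnil] at hr; simp at hr
    have ih := odd_case r hr
    have hlast : PySem.List.pyGet? (a :: b :: r) (-1) = PySem.List.pyGet? r (-1) := by
      cases r with
      | nil => exact absurd rfl hne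
      | cons c t =>
        rw [PySem.List.pyGet?_neg_one, PySem.List.pyGet?_neg_one]
        simp [List.getLast?_cons_cons]
    simp only [List.map_cons, oddsL, evensL, List.cons_append, List.zip_cons_cons, pairsChunks,
      hlast]
    rw [ih]
    rfl

-- ===== VERDICT (by name: the statement is the Claim_ definition above) =====
theorem pairwise_tuples_spec : Claim_equal_pairwise_tuples := by
  intro lst _
  have he : PySem.List.enumerate (lst.map PySem.Int.toStr) 0
      = (PySem.List.pyRange 0 (PySem.List.len (lst.map PySem.Int.toStr)) 1).map
          (fun j => (j, PySem.List.pyGetD (lst.map PySem.Int.toStr) j "")) :=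
    PySem.List.enumerate_eq_map_pyRange (lst.map PySem.Int.toStr) ""
  have hfold :
      (PySem.List.pyRange 0 (PySem.List.len (lst.map PySem.Int.toStr)) 1).foldl
        (fun (st : List String × List String) i =>
          if PySem.Int.mod (i + 1) 2 == 1 then (st.1 ++ [PySem.List.pyGetD (lst.map PySem.Int.toStr) i ""], st.2)
          else (st.1, st.2 ++ [PySem.List.pyGetD (lst.map PySem.Int.toStr) i ""])) ([], [])
      = (oddsL (lst.map PySem.Int.toStr), evensL (lst.map PySem.Int.toStr)) := by
    have h0 := fold_enum (lst.map PySem.Int.toStr) 0 [] [] rfl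
    rw [he, List.foldl_map] at h0
    simpa only [stepOE] using h0
  have hm : ∀ j : Int, PySem.Int.mod j 2 = j % 2 := fun j =>
    PySem.Int.mod_eq_emod_of_pos (by norm_num)
  simp only [Spec_pairwise_tuples, pairwise_tuples, pairwise_tuples_alt]
  rw [hfold]
  have hlen : PySem.List.len (lst.map PySem.Int.toStr) = (lst.length : Int) := by
    simp [PySem.List.len_eq]
  have hlen2 : PySem.List.len lst = (lst.length : Int) := by simp [PySem.List.len_eq]
  rw [hlen, hlen2]
  by_cases hpar : lst.length % 2 = 0
  · rw [if_pos (by rw [hm]; simp only [beq_iff_eq]; omega),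
        if_neg (by rw [hm]; simp only [beq_iff_eq]; omega)]
    exact even_case lst hpar
  · have hodd : lst.length % 2 = 1 := by omega
    rw [if_neg (by rw [hm]; simp only [beq_iff_eq]; omega),
        if_pos (by rw [hm]; simp only [beq_iff_eq]; omega)]
    exact odd_case lst hodd
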